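-- pv_equiv track=rewrite | github.com/10xJSChad/Boolfuck-Interpreter | Boolfuck.py | __input_to_bits
-- ===== SOURCE A (Python) =====
-- def __input_to_bits(input):
--     input_bits = []
--     for x in input:
--         input_bits.append(format(ord(x), 'b'))
--
--     for i, x in enumerate(input_bits):
--         while(len(input_bits[i]) < 8): input_bits[i] = "0" + input_bits[i]
--
--         #It is already in the right order and on its own does not need to be reversed
--         #However, if left as is, it will be reversed into the wrong order at the end of the interpretation
--         input_bits[i] = input_bits[i][::-1]
--     return ''.join(input_bits)
-- ===== SOURCE B (Python) =====
-- def __input_to_bits(input):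
--     bits = []
--     for x in input:
--         n = ord(x)
--         width = max(8, n.bit_length())
--         for i in range(width):
--             bits.append('1' if (n >> i) & 1 else '0')
--     return ''.join(bits)
-- ===== Notes on version B (the rewrite author's own statement) =====
-- stated objective: idiomatic
-- what changed: B extracts bits directly by shifting the code point (LSB-first, width = max(8, bit_length)) instead of building an MSB-first binary string, padding it with a while loop and slice-reversing it.
import Mathlib
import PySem

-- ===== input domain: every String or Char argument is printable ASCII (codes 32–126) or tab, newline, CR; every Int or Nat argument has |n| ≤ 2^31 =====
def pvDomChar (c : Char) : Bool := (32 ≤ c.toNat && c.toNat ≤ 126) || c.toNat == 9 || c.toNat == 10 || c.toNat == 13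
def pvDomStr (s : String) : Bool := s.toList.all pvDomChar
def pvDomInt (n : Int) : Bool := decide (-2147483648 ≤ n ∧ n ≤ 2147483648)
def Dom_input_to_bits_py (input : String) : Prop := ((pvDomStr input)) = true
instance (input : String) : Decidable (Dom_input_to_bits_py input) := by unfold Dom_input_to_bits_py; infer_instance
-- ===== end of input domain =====

-- B replaces A's format/zero-pad/slice-reverse pipeline by direct LSB-first bit extraction (idiomatic; same cost).

-- ===== PORT A =====
-- format(n, 'b'): MSB-first binary digits, "0" for 0
-- fuel n suffices since n/2 reaches 0 within n steps
def pvBinRepAux : Nat → Nat → List Char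
  | 0, _ => []
  | fuel + 1, n =>
    if n = 0 then [] else pvBinRepAux fuel (n / 2) ++ [if n % 2 = 1 then '1' else '0']

def pvBinRep (n : Nat) : List Char :=
  if n = 0 then ['0'] else pvBinRepAux n n

-- the while loop: while len(s) < 8: s = "0" + s  (runs at most 8 times)
def pvPadLoop : Nat → List Char → List Char
  | 0, s => s
  | k + 1, s => if s.length < 8 then pvPadLoop k ('0' :: s) else s

def pvPad8 (s : List Char) : List Char := pvPadLoop 8 s

def input_to_bits_py (input : String) : String :=
  let input_bits := input.toList.map (fun x => pvBinRep x.toNat)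
  let input_bits := input_bits.map (fun s => (pvPad8 s).reverse)
  String.ofList input_bits.flatten

-- ===== PORT B =====
-- n.bit_length() (builtin): number of binary digits of n; fuel n suffices since n/2 reaches 0 within n steps
def pvBitLengthAux : Nat → Nat → Nat
  | 0, _ => 0
  | fuel + 1, n => if n = 0 then 0 else pvBitLengthAux fuel (n / 2) + 1

def pvBitLength (n : Nat) : Nat := pvBitLengthAux n n

def pvCharBits (n : Nat) : List Char :=
  (List.range (max 8 (pvBitLength n))).map (fun i => if (n >>> i) % 2 = 1 then '1' else '0')

def input_to_bits_py_alt (input : String) : String :=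
  String.ofList ((input.toList.map (fun c => pvCharBits c.toNat)).flatten)

-- ===== PRECONDITION & SPEC =====
def Spec_input_to_bits_py (input : String) (out : String) : Prop := out = input_to_bits_py_alt input
instance (input : String) (out : String) : Decidable (Spec_input_to_bits_py input out) := by unfold Spec_input_to_bits_py; infer_instance

-- ===== CLAIM (what is proved, stated in full; the proofs are below) =====
def Claim_equal_input_to_bits_py : Prop := ∀ (input : String), Dom_input_to_bits_py input → Spec_input_to_bits_py input (input_to_bits_py input)

-- ===== LEMMAS AND PROOFS =====
-- on every code point the domain admits, the per-character outputs coincide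
theorem pv_char_eq : ∀ n : Nat, n < 127 → (pvPad8 (pvBinRep n)).reverse = pvCharBits n := by decide

theorem pv_dom_char_lt (c : Char) (h : pvDomChar c = true) : c.toNat < 127 := by
  simp [pvDomChar] at h; omega

-- ===== VERDICT (by name: the statement is the Claim_ definition above) =====
theorem input_to_bits_py_spec : Claim_equal_input_to_bits_py := by
  intro input hdom
  unfold Spec_input_to_bits_py input_to_bits_py input_to_bits_py_alt
  simp only []
  congr 1
  congr 1
  rw [List.map_map]
  apply List.map_congr_left
  intro c hc
  have hd : pvDomChar c = true := by
    have := (List.all_eq_true.mp hdom) c hc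
    exact this
  simpa [Function.comp] using pv_char_eq c.toNat (pv_dom_char_lt c hd)
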